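-- pv_equiv track=rewrite | github.com/miliar/Code_Jam_Webscraper | solutions_python/Problem_178/1436.py | solve
-- ===== SOURCE A (Python) =====
-- def check(a):
--     for i in a:
--         if i == False:
--             return False
--     return True
--
-- def solve(a):
--     if len(a) == 0 or check(a):
--         return 0
--     count = 1
--     b = list()
--     b[:] = reversed(a)
--     i = b.index(False)
--     while i < len(b):
--         b = list(map(lambda x: not x, b[i:]))
--         if check(b):
--             return count
--         count += 1
--         i = b.index(False)
-- ===== SOURCE B (Python) =====
-- def solve(a):
--     count = 1 if a and a[-1] == False else 0
--     for x, y in zip(a, a[1:]):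
--         if x != y:
--             count += 1
--     return count
-- ===== Notes on version B (the rewrite author's own statement) =====
-- stated objective: faster
-- what changed: Replaces repeated reverse/flip/index passes with a single forward scan counting adjacent value transitions plus one if the last element is False.
import Mathlib
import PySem

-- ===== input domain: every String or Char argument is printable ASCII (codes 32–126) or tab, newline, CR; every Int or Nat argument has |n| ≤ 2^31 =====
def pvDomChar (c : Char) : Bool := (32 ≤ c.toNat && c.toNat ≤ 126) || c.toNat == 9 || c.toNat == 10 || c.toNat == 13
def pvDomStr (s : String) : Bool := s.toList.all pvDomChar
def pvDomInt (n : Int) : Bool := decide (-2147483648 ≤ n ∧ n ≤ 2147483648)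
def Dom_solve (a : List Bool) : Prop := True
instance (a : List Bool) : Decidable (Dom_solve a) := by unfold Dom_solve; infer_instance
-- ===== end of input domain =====

-- B replaces A's quadratic repeated reverse/flip/index passes with one linear scan
-- counting adjacent transitions (plus one if the last element is False): faster.

-- ===== PORT A =====
def check : List Bool → Bool
  | [] => true
  | i :: rest => if i == false then false else check rest

def solveLoop (b : List Bool) (count : Int) : Int :=
  let i := (PySem.List.index? b false).getD b.length
  let b' := (b.drop i).map not
  if check b' then count
  else solveLoop b' (count + 1)
termination_by b.length + (if b.head? = some false then 1 else 0)
decreasing_by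
  -- the next list starts with true and is no longer than b (strictly shorter unless b starts false)
  rename_i hch
  show b'.length + (if b'.head? = some false then 1 else 0) <
      b.length + (if b.head? = some false then 1 else 0)
  have hmem : false ∈ b := by
    by_contra hno
    have hnone : PySem.List.index? b false = none := by
      rw [PySem.List.index?_eq_none_iff]; exact hno
    have hb0 : b' = [] := by
      simp only [b', i, hnone, Option.getD_none, List.drop_length, List.map_nil]
    rw [hb0] at hch
    simp [check] at hch
  obtain ⟨k, hk⟩ : ∃ k, PySem.List.index? b false = some k := by
    have := (PySem.List.index?_isSome_iff b false).mpr hmem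
    exact Option.isSome_iff_exists.mp this
  obtain ⟨pre, suf, hb, hlen, hpre⟩ := (PySem.List.index?_eq_some_iff _ _ _).mp hk
  have hdrop : b.drop k = false :: suf := by
    subst hb; rw [← hlen]; simp [List.drop_left]
  have hb'def : b' = (false :: suf).map not := by
    simp only [b', i, hk, Option.getD_some, hdrop]
  have hb'len : b'.length = suf.length + 1 := by rw [hb'def]; simp
  have hb'head : b'.head? = some true := by rw [hb'def]; rfl
  have hblen : b.length = pre.length + 1 + suf.length := by subst hb; simp; omega
  rw [hb'head]
  have hiftrue : (if (some true : Option Bool) = some false then (1:ℕ) else 0) = 0 := by simp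
  rw [hiftrue]
  rcases Nat.eq_zero_or_pos k with h0 | hpos
  · have hbh : b.head? = some false := by
      have : pre = [] := by rw [← hlen] at h0; exact List.eq_nil_of_length_eq_zero h0
      subst hb; simp [this]
    rw [hbh]
    have h2 : (if (some false : Option Bool) = some false then (1:ℕ) else 0) = 1 := by simp
    rw [h2]
    omega
  · split <;> omega

def solve (a : List Bool) : Int :=
  if a.length == 0 || check a then 0
  else solveLoop a.reverse 1

-- ===== PORT B =====
def solve_alt (a : List Bool) : Int :=
  let count : Int := if a.getLast? = some false then 1 else 0
  (a.zip a.tail).foldl (fun c p => if p.1 != p.2 then c + 1 else c) count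

-- ===== PRECONDITION & SPEC =====
def Spec_solve (a : List Bool) (out : Int) : Prop := out = solve_alt a
instance (a : List Bool) (out : Int) : Decidable (Spec_solve a out) := by unfold Spec_solve; infer_instance

-- ===== CLAIM (what is proved, stated in full; the proofs are below) =====
def Claim_equal_solve : Prop := ∀ (a : List Bool), Dom_solve a → Spec_solve a (solve a)

-- ===== LEMMAS AND PROOFS =====

theorem check_eq_false_mem : ∀ (l : List Bool), check l = false → false ∈ l := by
  intro l h
  induction l with
  | nil => simp [check] at h
  | cons x xs ih =>
    by_cases hx : x = false
    · simp [hx]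
    · simp [check, hx] at h
      simp [ih h]


-- number of adjacent transitions
def transCnt : List Bool → Int
  | x :: y :: r => (if x != y then 1 else 0) + transCnt (y :: r)
  | _ => 0

theorem alt_foldl_eq (l : List Bool) (c : Int) :
    (l.zip l.tail).foldl (fun c p => if p.1 != p.2 then c + 1 else c) c = c + transCnt l := by
  induction l generalizing c with
  | nil => simp [transCnt]
  | cons x xs ih =>
    cases xs with
    | nil => simp [transCnt]
    | cons y r =>
      simp only [List.tail_cons, List.zip_cons_cons, List.foldl_cons]
      simp only [List.tail_cons] at ih
      rw [ih]
      simp [transCnt]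
      split <;> ring

theorem solve_alt_eq (a : List Bool) :
    solve_alt a = (if a.getLast? = some false then 1 else 0) + transCnt a :=
  alt_foldl_eq a _

theorem check_eq_true_iff (l : List Bool) : check l = true ↔ ∀ x ∈ l, x = true := by
  induction l with
  | nil => simp [check]
  | cons x xs ih =>
    cases x <;> simp [check, ih]

theorem transCnt_all_true (l : List Bool) (h : ∀ x ∈ l, x = true) : transCnt l = 0 := by
  induction l with
  | nil => simp [transCnt]
  | cons x xs ih =>
    cases xs with
    | nil => simp [transCnt]
    | cons y r =>
      have hx := h x (by simp)
      have hy := h y (by simp)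
      rw [transCnt, ih (by intro z hz; exact h z (List.mem_cons_of_mem _ hz))]
      simp [hx, hy]

theorem transCnt_map_not (l : List Bool) : transCnt (l.map not) = transCnt l := by
  induction l with
  | nil => simp [transCnt]
  | cons x xs ih =>
    cases xs with
    | nil => simp [transCnt]
    | cons y r =>
      simp only [List.map_cons] at *
      rw [transCnt, transCnt, ih]
      cases x <;> cases y <;> simp

theorem transCnt_true_prefix (pre suf : List Bool) (h : ∀ x ∈ pre, x = true) :
    transCnt (pre ++ false :: suf) = (if pre = [] then 0 else 1) + transCnt (false :: suf) := by
  induction pre with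
  | nil => simp
  | cons t rest ih =>
    have ht := h t (by simp)
    cases rest with
    | nil => simp [transCnt, ht]
    | cons u r2 =>
      have hu := h u (by simp)
      have := ih (by intro z hz; exact h z (List.mem_cons_of_mem _ hz))
      simp only [List.cons_append] at *
      rw [transCnt, this]
      simp [ht, hu]

theorem transCnt_append_singleton (l : List Bool) (x : Bool) :
    transCnt (l ++ [x]) =
      transCnt l + (match l.getLast? with
                 | some y => if y != x then 1 else 0
                 | none => 0) := by
  induction l with
  | nil => simp [transCnt]
  | cons t rest ih =>
    cases rest with
    | nil => simp [transCnt]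
    | cons u r2 =>
      simp only [List.cons_append] at *
      rw [transCnt, ih, transCnt]
      simp [List.getLast?_cons_cons]
      ring

theorem transCnt_reverse (l : List Bool) : transCnt l.reverse = transCnt l := by
  induction l with
  | nil => rfl
  | cons x xs ih =>
    rw [List.reverse_cons, transCnt_append_singleton, ih]
    cases xs with
    | nil => simp [transCnt]
    | cons y r =>
      rw [List.getLast?_reverse]
      simp [transCnt]
      cases x <;> cases y <;> simp <;> ring

theorem solveLoop_eq (b : List Bool) (count : Int) (hmem : false ∈ b) :
    solveLoop b count =
      count + transCnt b + (if b.head? = some false then 1 else 0) - 1 := by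
  fun_induction solveLoop b count with
  | case1 b count i b' hch =>
    -- returned count: b' is all true
    obtain ⟨k, hk⟩ : ∃ k, PySem.List.index? b false = some k :=
      Option.isSome_iff_exists.mp ((PySem.List.index?_isSome_iff _ _).mpr hmem)
    obtain ⟨pre, suf, hb, hlen, hpre⟩ := (PySem.List.index?_eq_some_iff _ _ _).mp hk
    have hdrop : b.drop k = false :: suf := by
      subst hb; rw [← hlen]; simp [List.drop_left]
    have hb' : b' = (false :: suf).map not := by simp only [b', i, hk, Option.getD_some, hdrop]
    have hsufz : transCnt (false :: suf) = 0 := by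
      rw [← transCnt_map_not, ← hb']
      exact transCnt_all_true _ (by
        intro x hx
        have := (check_eq_true_iff b').mp hch
        exact this x hx)
    have hpretrue : ∀ x ∈ pre, x = true := by
      intro x hx
      cases x
      · exact absurd hx hpre
      · rfl
    subst hb
    rw [transCnt_true_prefix pre suf hpretrue, hsufz]
    cases pre with
    | nil => simp
    | cons p ps =>
      have hp := hpretrue p (by simp)
      simp [hp]
  | case2 b count i b' hch ih =>
    obtain ⟨k, hk⟩ : ∃ k, PySem.List.index? b false = some k :=
      Option.isSome_iff_exists.mp ((PySem.List.index?_isSome_iff _ _).mpr hmem)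
    obtain ⟨pre, suf, hb, hlen, hpre⟩ := (PySem.List.index?_eq_some_iff _ _ _).mp hk
    have hdrop : b.drop k = false :: suf := by
      subst hb; rw [← hlen]; simp [List.drop_left]
    have hb' : b' = (false :: suf).map not := by simp only [b', i, hk, Option.getD_some, hdrop]
    have hmem' : false ∈ b' := check_eq_false_mem b' (by simpa using hch)
    have htransCnt' : transCnt b' = transCnt (false :: suf) := by rw [hb', transCnt_map_not]
    have hhead' : b'.head? = some true := by simp [hb']
    rw [ih hmem', htransCnt', hhead']
    have hpretrue : ∀ x ∈ pre, x = true := by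
      intro x hx
      cases x
      · exact absurd hx hpre
      · rfl
    subst hb
    rw [transCnt_true_prefix pre suf hpretrue]
    cases pre with
    | nil => simp; ring
    | cons p ps =>
      have hp := hpretrue p (by simp)
      simp [hp]
      ring

-- ===== VERDICT (by name: the statement is the Claim_ definition above) =====
theorem solve_spec : Claim_equal_solve := by
  intro a _
  unfold Spec_solve solve
  by_cases hnil : a = []
  · subst hnil; simp [solve_alt, transCnt]
  · by_cases hall : check a = true
    · have hTrue : ∀ x ∈ a, x = true := (check_eq_true_iff a).mp hall
      rw [solve_alt_eq, transCnt_all_true a hTrue]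
      have : a.getLast? ≠ some false := by
        cases hl : a.getLast? with
        | none => simp
        | some v =>
          have := hTrue v (List.mem_of_getLast? hl)
          subst this; simp
      simp [hnil, hall, this]
    · have hmem : false ∈ a := check_eq_false_mem a (by simpa using hall)
      have hmemr : false ∈ a.reverse := by simpa using hmem
      have hlen0 : (a.length == 0) = false := by
        simp [List.length_eq_zero_iff]; exact hnil
      rw [hlen0]
      simp only [hall, Bool.or_false, Bool.false_eq_true, if_false]
      rw [solveLoop_eq a.reverse 1 hmemr, solve_alt_eq, transCnt_reverse]
      rw [List.head?_reverse]
      ring
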